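-- pv_equiv track=rewrite | github.com/sashasochka/openrouter-mcp | src/openrouter_mcp/collective_intelligence/orchestrator.py | _normalise_content
-- ===== SOURCE A (Python) =====
-- def _normalise_content(content: str) -> set[str]:
--     """
--     Tokenise content into an order-invariant word set.
--
--     Basic normalisation delivers a balance between robustness and speed.
--     """
--     tokens = []
--     current = []
--     for char in content.lower():
--         if char.isalnum():
--             current.append(char)
--         elif current:
--             tokens.append("".join(current))
--             current.clear()
--     if current:
--         tokens.append("".join(current))
--     return set(tokens)
-- ===== SOURCE B (Python) =====
-- def _normalise_content(content: str) -> set[str]: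
--     """Tokenise content into an order-invariant word set (run-finding scan)."""
--     s = content.lower()
--     n = len(s)
--     out = set()
--     i = 0
--     while i < n:
--         if s[i].isalnum():
--             j = i
--             while j < n and s[j].isalnum():
--                 j += 1
--             out.add(s[i:j])
--             i = j
--         else:
--             i += 1
--     return out
-- ===== Notes on version B (the rewrite author's own statement) =====
-- stated objective: alternative
-- what changed: Replaces A's per-character buffer accumulate/flush loop with a two-pointer scan that locates each maximal alphanumeric run and slices it out directly, adding it to the set as it goes.
import Mathlib
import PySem

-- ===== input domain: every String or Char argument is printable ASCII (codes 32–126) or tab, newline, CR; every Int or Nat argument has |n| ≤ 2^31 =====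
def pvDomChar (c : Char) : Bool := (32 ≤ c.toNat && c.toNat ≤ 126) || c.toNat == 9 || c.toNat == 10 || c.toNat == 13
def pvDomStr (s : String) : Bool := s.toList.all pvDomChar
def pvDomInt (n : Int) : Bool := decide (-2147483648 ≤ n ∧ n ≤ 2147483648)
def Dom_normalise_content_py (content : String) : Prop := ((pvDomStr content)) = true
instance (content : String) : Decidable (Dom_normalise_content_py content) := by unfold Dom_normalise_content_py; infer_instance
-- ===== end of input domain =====

-- B replaces A's buffer accumulate/flush loop by a two-pointer maximal-run scan; objective: alternative (same cost).

-- ===== PORT A =====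
-- loop body of A: state = (tokens, current); append alnum chars, flush the buffer on a separator
def pvAStep (st : List (List Char) × List Char) (c : Char) : List (List Char) × List Char :=
  if PySem.Chars.isalnum c then (st.1, st.2 ++ [c])
  else if st.2 = [] then st
  else (st.1 ++ [st.2], [])

def normalise_content_py (content : String) : List String :=
  let st := (PySem.Chars.lower content.toList).foldl pvAStep ([], [])
  let tokens := if st.2 = [] then st.1 else st.1 ++ [st.2]
  PySem.Set.ofList (tokens.map String.ofList)

-- ===== PORT B =====
-- B's outer while loop: skip a non-alnum char, or slice out the maximal alnum run (the inner j-loop = takeWhile/dropWhile)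
def pvBRuns : List Char → List (List Char)
  | [] => []
  | c :: cs =>
    if PySem.Chars.isalnum c then
      (c :: cs.takeWhile PySem.Chars.isalnum) :: pvBRuns (cs.dropWhile PySem.Chars.isalnum)
    else pvBRuns cs
termination_by l => l.length
decreasing_by
  · exact Nat.lt_succ_of_le (cs.length_dropWhile_le _)
  · exact Nat.lt_succ_self _

def normalise_content_py_alt (content : String) : List String :=
  PySem.Set.ofList ((pvBRuns (PySem.Chars.lower content.toList)).map String.ofList)

-- ===== PRECONDITION & SPEC =====
def Spec_normalise_content_py (content : String) (out : List String) : Prop := out = normalise_content_py_alt content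
instance (content : String) (out : List String) : Decidable (Spec_normalise_content_py content out) := by unfold Spec_normalise_content_py; infer_instance

-- ===== CLAIM (what is proved, stated in full; the proofs are below) =====
def Claim_equal_normalise_content_py : Prop := ∀ (content : String), Dom_normalise_content_py content → Spec_normalise_content_py content (normalise_content_py content)

-- ===== LEMMAS AND PROOFS =====

-- the final flush in A ("if current: tokens.append(...)"), as a named helper for the loop invariant
def pvFlush (st : List (List Char) × List Char) : List (List Char) :=
  if st.2 = [] then st.1 else st.1 ++ [st.2]

-- A's loop result, re-expressed as a recursion on the input with the pending buffer as parameter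
def pvRunsAux (cur : List Char) : List Char → List (List Char)
  | [] => if cur = [] then [] else [cur]
  | c :: cs =>
    if PySem.Chars.isalnum c then pvRunsAux (cur ++ [c]) cs
    else if cur = [] then pvRunsAux [] cs
    else cur :: pvRunsAux [] cs

lemma pvFoldl_eq_runsAux (l : List Char) :
    ∀ (tokens : List (List Char)) (cur : List Char),
    pvFlush (l.foldl pvAStep (tokens, cur)) = tokens ++ pvRunsAux cur l := by
  induction l with
  | nil =>
    intro tokens cur
    simp only [List.foldl_nil, pvRunsAux, pvFlush]
    split_ifs <;> simp
  | cons c cs ih =>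
    intro tokens cur
    by_cases h1 : PySem.Chars.isalnum c = true
    · rw [List.foldl_cons]
      simp only [pvAStep, h1, if_true]
      rw [ih, pvRunsAux, if_pos h1]
    · by_cases h2 : cur = ([] : List Char)
      · rw [List.foldl_cons]
        simp only [pvAStep, h1, h2, ite_true]
        rw [ih]
        simp [pvRunsAux, h1]
      · rw [List.foldl_cons]
        simp only [pvAStep, h1, h2, ite_false]
        rw [ih]
        simp [pvRunsAux, h1, h2]

lemma pvRunsAux_eq_bruns (l : List Char) :
    pvRunsAux [] l = pvBRuns l ∧
    ∀ cur : List Char, cur ≠ [] →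
      pvRunsAux cur l =
        (cur ++ l.takeWhile PySem.Chars.isalnum) :: pvBRuns (l.dropWhile PySem.Chars.isalnum) := by
  induction l with
  | nil =>
    refine ⟨by simp [pvRunsAux, pvBRuns], fun cur hcur => ?_⟩
    simp [pvRunsAux, pvBRuns, hcur]
  | cons c cs ih =>
    by_cases h : PySem.Chars.isalnum c = true
    · constructor
      · rw [pvRunsAux, if_pos h, show ([] : List Char) ++ [c] = [c] from rfl,
            ih.2 [c] (by simp), pvBRuns]
        simp [h]
      · intro cur hcur
        rw [pvRunsAux, if_pos h, ih.2 (cur ++ [c]) (by simp)]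
        simp [h]
    · constructor
      · rw [pvRunsAux, if_neg h, if_pos rfl, ih.1, pvBRuns]
        simp [h]
      · intro cur hcur
        rw [pvRunsAux, if_neg h, if_neg hcur, ih.1]
        simp [h, pvBRuns]

-- ===== VERDICT (by name: the statement is the Claim_ definition above) =====
theorem normalise_content_py_spec : Claim_equal_normalise_content_py := by
  intro content _
  show PySem.Set.ofList ((pvFlush ((PySem.Chars.lower content.toList).foldl pvAStep ([], []))).map String.ofList)
      = normalise_content_py_alt content
  rw [pvFoldl_eq_runsAux, (pvRunsAux_eq_bruns _).1]
  simp [normalise_content_py_alt]
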